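-- pv_equiv track=rewrite | github.com/matulma4/esc | tfidf.py | proc_query
-- ===== SOURCE A (Python) =====
-- def get_key(value,dic):
--     for key in dic:
--         if dic[key] == value:
--             return key
--     return -1
--
-- def proc_query(query,dictionary):
--     new_q = [get_key(value, dictionary) for value in query]
--     result = {}
--     for term in new_q:
--         if term in result.keys():
--             result[term] += 1
--         else:
--             result[term] = 1
--     return [(key,result[key]) for key in result.keys()]
-- ===== SOURCE B (Python) =====
-- def proc_query(query, dictionary):
--     inv = {}
--     for key, value in dictionary.items():
--         if value not in inv:
--             inv[value] = key
--     counts = {}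
--     for value in query:
--         counts[value] = counts.get(value, 0) + 1
--     result = {}
--     for value, n in counts.items():
--         key = inv.get(value, -1)
--         if key in result:
--             result[key] += n
--         else:
--             result[key] = n
--     return list(result.items())
-- ===== Notes on version B (the rewrite author's own statement) =====
-- stated objective: faster
-- what changed: B inverts the dictionary into a value->key map once and tallies the raw query values first, doing one reverse lookup per distinct value (counts-then-maps), instead of A's linear scan of the whole dictionary for every query element (maps-then-counts).
import Mathlib
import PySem

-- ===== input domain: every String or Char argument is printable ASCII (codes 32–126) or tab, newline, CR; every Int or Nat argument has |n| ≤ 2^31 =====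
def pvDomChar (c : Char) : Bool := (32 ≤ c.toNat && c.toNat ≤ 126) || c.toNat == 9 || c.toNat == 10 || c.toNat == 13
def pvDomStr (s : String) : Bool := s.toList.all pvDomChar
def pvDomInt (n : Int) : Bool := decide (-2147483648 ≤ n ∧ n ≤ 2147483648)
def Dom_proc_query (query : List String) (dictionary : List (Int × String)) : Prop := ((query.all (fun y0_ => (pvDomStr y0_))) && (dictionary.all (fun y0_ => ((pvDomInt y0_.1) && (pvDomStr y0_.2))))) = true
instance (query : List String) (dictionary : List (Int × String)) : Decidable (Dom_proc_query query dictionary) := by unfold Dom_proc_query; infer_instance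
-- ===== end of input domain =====

-- B builds the value→key inverse map once and tallies distinct query values first (one reverse
-- lookup per distinct value) instead of A's linear dictionary scan per query element.


-- ===== PORT A =====
-- get_key: 'for key in dic: if dic[key] == value: return key' — iterating the dict's keys and
-- looking each one up is iterating its (key, value) items in insertion order; 'return -1' at the end.
def get_key (value : String) (items : List (Int × String)) : Int :=
  match items with
  | [] => -1
  | (key, w) :: rest => if w == value then key else get_key value rest


def proc_query (query : List String) (dictionary : List (Int × String)) : List (Int × Int) :=
  let dic : PySem.Dict Int String := PySem.Dict.ofList dictionary
  let new_q : List Int := query.map (fun value => get_key value dic.items)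
  let result : PySem.Dict Int Int :=
    new_q.foldl (fun result term =>
      if result.contains term then result.modify term 0 (· + 1)
      else result.insert term 1) PySem.Dict.empty
  result.keys.map (fun key => (key, result.getD key 0))


-- ===== PORT B =====
def proc_query_alt (query : List String) (dictionary : List (Int × String)) : List (Int × Int) :=
  let dicItems := (PySem.Dict.ofList dictionary).items
  -- for key, value in dictionary.items(): if value not in inv: inv[value] = key
  let inv : PySem.Dict String Int :=
    dicItems.foldl (fun inv p => if inv.contains p.2 then inv else inv.insert p.2 p.1)
      PySem.Dict.empty
  -- counts[value] = counts.get(value, 0) + 1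
  let counts : PySem.Dict String Int :=
    query.foldl (fun counts value => counts.insert value (counts.getD value 0 + 1))
      PySem.Dict.empty
  -- for value, n in counts.items(): key = inv.get(value, -1); result[key] += n / result[key] = n
  let result : PySem.Dict Int Int :=
    counts.items.foldl (fun result p =>
      let key := inv.getD p.1 (-1)
      if result.contains key then result.modify key 0 (· + p.2)
      else result.insert key p.2) PySem.Dict.empty
  result.items

-- ===== PRECONDITION & SPEC =====
def Spec_proc_query (query : List String) (dictionary : List (Int × String)) (out : List (Int × Int)) : Prop := out = proc_query_alt query dictionary
instance (query : List String) (dictionary : List (Int × String)) (out : List (Int × Int)) : Decidable (Spec_proc_query query dictionary out) := by unfold Spec_proc_query; infer_instance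

-- ===== CLAIM (what is proved, stated in full; the proofs are below) =====
def Claim_equal_proc_query : Prop := ∀ (query : List String) (dictionary : List (Int × String)), Dom_proc_query query dictionary → Spec_proc_query query dictionary (proc_query query dictionary)

-- ===== LEMMAS AND PROOFS =====

-- B's inverse map looked up with default -1 computes A's linear scan get_key.
lemma inv_getD (L : List (Int × String)) (v : String) :
    ∀ m : PySem.Dict String Int,
      (L.foldl (fun inv p => if inv.contains p.2 then inv else inv.insert p.2 p.1) m).getD v (-1)
        = if m.contains v then m.getD v (-1) else get_key v L := by
  induction L with
  | nil =>
    intro m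
    simp only [List.foldl_nil, get_key]
    split_ifs with h
    · rfl
    · exact PySem.Dict.getD_of_not_contains _ _ (by simpa using h)
  | cons p t ih =>
    intro m
    obtain ⟨k, w⟩ := p
    simp only [List.foldl_cons, get_key]
    by_cases hw : m.contains w
    · rw [if_pos hw, ih m]
      by_cases hv : v = w
      · subst hv; simp [hw]
      · simp [beq_iff_eq, Ne.symm hv]
    · rw [if_neg hw, ih]
      by_cases hv : v = w
      · subst hv
        simp [hw]
      · rw [PySem.Dict.contains_insert]
        simp [PySem.Dict.getD_insert, beq_iff_eq, hv, Ne.symm hv]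

lemma incrBy_eq_modify {κ : Type} [BEq κ] [LawfulBEq κ] (d : PySem.Dict κ Int) (k : κ) (n : Int) :
    (if d.contains k then d.modify k 0 (· + n) else d.insert k n) = d.modify k 0 (· + n) := by
  by_cases h : d.contains k
  · rw [if_pos h]
  · rw [if_neg h, PySem.Dict.modify, PySem.Dict.getD_of_not_contains _ _ (by simpa using h)]
    norm_num

lemma ofList_map_ofList {α β : Type} [BEq α] [LawfulBEq α] [BEq β] [LawfulBEq β]
    (f : α → β) (q : List α) :
    PySem.Set.ofList ((PySem.Set.ofList q).map f) = PySem.Set.ofList (q.map f) := by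
  induction q using List.reverseRecOn with
  | nil => rfl
  | append_singleton t x ih =>
    rw [List.map_append, List.map_singleton, PySem.Set.ofList_append_singleton,
        PySem.Set.ofList_append_singleton, ← ih]
    by_cases hx : x ∈ PySem.Set.ofList t
    · rw [PySem.Set.add_of_mem hx]
      rw [PySem.Set.add_of_mem]
      rw [PySem.Set.mem_ofList]
      exact List.mem_map_of_mem hx
    · rw [PySem.Set.add_of_not_mem hx, List.map_append, List.map_singleton,
          PySem.Set.ofList_append_singleton]

lemma getD_foldl_modify_key_add {κ β : Type} [BEq κ] [LawfulBEq κ] [DecidableEq κ]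
    (l : List β) (key : β → κ) (val : β → Int) (k : κ) :
    ∀ d : PySem.Dict κ Int,
    (l.foldl (fun r p => r.modify (key p) 0 (· + val p)) d).getD k 0
      = d.getD k 0 + ((l.filter (fun p => key p == k)).map val).sum := by
  induction l with
  | nil => intro d; simp
  | cons p t ih =>
    intro d
    simp only [List.foldl_cons, List.filter_cons]
    rw [ih]
    by_cases hk : key p = k
    · simp [hk]
      ring
    · simp [hk, PySem.Dict.getD_modify, Ne.symm hk]

lemma count_beq_congr {α : Type} [BEq α] [LawfulBEq α] [DecidableEq α] (a : α) (l : List α) :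
    List.count a l = @List.count α instBEqOfDecidableEq a l := by
  simp only [List.count_eq_countP]
  congr 1
  funext v
  simp

lemma sum_counts_eq_count_map_nat {α β : Type} [BEq α] [LawfulBEq α] [DecidableEq α] [DecidableEq β]
    (f : α → β) (q : List α) (k : β) :
    (((PySem.Set.ofList q).filter (fun v => f v == k)).map (fun v => q.count v)).sum
      = (q.map f).count k := by
  have h1 : (q.map f).count k = (q.filter (fun v => f v == k)).length := by
    simp [List.count_eq_countP, List.countP_eq_length_filter, List.filter_map, Function.comp_def]
  have hnd : ((PySem.Set.ofList q).filter (fun v => f v == k)).Nodup :=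
    (PySem.Set.nodup_ofList q).filter _
  rw [h1, ← List.sum_toFinset _ hnd]
  rw [← List.sum_toFinset_count_eq_length (q.filter (fun v => f v == k))]
  have hset : ((PySem.Set.ofList q).filter (fun v => f v == k)).toFinset
      = (q.filter (fun v => f v == k)).toFinset := by
    ext a
    simp [PySem.Set.mem_ofList]
  rw [hset]
  apply Finset.sum_congr rfl
  intro a ha
  simp only [List.mem_toFinset, List.mem_filter] at ha
  rw [count_beq_congr]
  exact (@List.count_filter α instBEqOfDecidableEq _ (fun v => f v == k) a q ha.2).symm

lemma sum_counts_eq_count_map {α β : Type} [BEq α] [LawfulBEq α] [DecidableEq α] [DecidableEq β]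
    (f : α → β) (q : List α) (k : β) :
    ((((PySem.Set.ofList q).filter (fun v => f v == k)).map (fun v => (q.count v : Int))).sum)
      = ((q.map f).count k : Int) := by
  have h2 : (((PySem.Set.ofList q).filter (fun v => f v == k)).map (fun v => (q.count v : Int))).sum
      = (((((PySem.Set.ofList q).filter (fun v => f v == k)).map (fun v => q.count v)).sum : ℕ) : Int) := by
    push_cast
    rw [List.map_map]
    rfl
  rw [h2, sum_counts_eq_count_map_nat f q k]


-- the full equivalence, proved pointwise on dictionaries down to counter items
lemma main_eq (query : List String) (dictionary : List (Int × String)) :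
    proc_query query dictionary = proc_query_alt query dictionary := by
  unfold proc_query proc_query_alt
  dsimp only
  set L := (PySem.Dict.ofList dictionary).items with hL
  set f : String → Int := fun value => get_key value L with hf
  -- A's counting fold is counter (query.map f)
  have hA : (List.foldl (fun result term =>
      if result.contains term then result.modify term 0 (· + 1)
      else result.insert term 1) PySem.Dict.empty (query.map f))
      = PySem.Dict.counter (query.map f) := by
    have hstep : (fun (result : PySem.Dict Int Int) term =>
        if result.contains term then result.modify term 0 (· + 1)
        else result.insert term 1) = (fun result term => result.modify term 0 (· + 1)) := by
      funext d t
      have := incrBy_eq_modify d t 1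
      simpa using this
    rw [hstep, PySem.Dict.counter_eq_foldl]
  -- inv lookup is f
  have hinv : ∀ v, (List.foldl (fun inv p =>
      if inv.contains p.2 then inv else inv.insert p.2 p.1) PySem.Dict.empty L).getD v (-1) = f v := by
    intro v
    rw [inv_getD]
    simp only [PySem.Dict.contains_empty, Bool.false_eq_true, if_false]
    rfl
  -- B's counts is counter query
  have hcounts : (List.foldl (fun counts value => counts.insert value (counts.getD value 0 + 1))
      PySem.Dict.empty query) = PySem.Dict.counter query :=
    PySem.Dict.foldl_insert_getD_add_one_eq_counter query
  rw [hA, hcounts]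
  -- B's result fold normalised to a modify fold over keys f p.1
  have hstepB : (fun (result : PySem.Dict Int Int) (p : String × Int) =>
      let key := (List.foldl (fun inv q =>
        if inv.contains q.2 then inv else inv.insert q.2 q.1) PySem.Dict.empty L).getD p.1 (-1);
      if result.contains key then result.modify key 0 (· + p.2)
      else result.insert key p.2)
      = (fun result p => result.modify (f p.1) 0 (· + p.2)) := by
    funext r p
    simp only [hinv p.1]
    exact incrBy_eq_modify r (f p.1) p.2
  rw [hstepB]
  set RB := (PySem.Dict.counter query).items.foldl
    (fun (result : PySem.Dict Int Int) p => result.modify (f p.1) 0 (· + p.2)) PySem.Dict.empty with hRB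
  -- keys of RB
  have hkeysB : RB.keys = PySem.Set.ofList (query.map f) := by
    rw [hRB]
    rw [PySem.Dict.keys_foldl_modify_key ((PySem.Dict.counter query).items)
      (fun p => f p.1) 0 (fun _ p => (· + p.2)) PySem.Dict.empty]
    rw [PySem.Dict.items_counter]
    rw [List.map_map]
    have : ((fun (p : String × Int) => f p.1) ∘ fun k => (k, (List.count k query : Int)))
        = f := by funext v; rfl
    rw [this, ← ofList_map_ofList f query]
    rfl
  have hnodB : RB.keys.Nodup := by
    rw [hkeysB]; exact PySem.Set.nodup_ofList _
  have hvalB : ∀ k, RB.getD k 0 = ((query.map f).count k : Int) := by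
    intro k
    rw [hRB]
    rw [getD_foldl_modify_key_add ((PySem.Dict.counter query).items)
      (fun p => f p.1) (fun p => p.2) k PySem.Dict.empty]
    rw [PySem.Dict.items_counter]
    rw [List.filter_map, List.map_map]
    simp only [Function.comp_def]
    rw [← sum_counts_eq_count_map f query k]
    simp [PySem.Dict.getD_empty]
  -- finish: both sides are the items of the counter of query.map f
  rw [PySem.Dict.items_eq_map_keys RB hnodB 0, hkeysB]
  rw [PySem.Dict.keys_counter]
  apply List.map_congr_left
  intro k hk
  rw [hvalB k, PySem.Dict.getD_counter]


-- ===== VERDICT (by name: the statement is the Claim_ definition above) =====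
theorem proc_query_spec : Claim_equal_proc_query := by
  intro query dictionary _
  unfold Spec_proc_query
  exact main_eq query dictionary
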